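-- pv_equiv track=rewrite | github.com/LIKONG709394/deep-learning-group-project | controller_tflite.py | _normalize_label_for_matching
-- ===== SOURCE A (Python) =====
-- def _normalize_label_for_matching(s: str) -> str:
--     """標準化標籤字串：去除首尾空白、小寫、把非英數字轉空白並斷詞。
--     回傳第一個能對應的方向字串 ('up','left','right','down') 或空字串表示無法辨識。
--     """
--     if not s:
--         return ''
--     s = s.strip().lower()
--     # 把非英數字轉為空格，保留連字元會被去掉
--     clean = ''.join(ch if ch.isalnum() else ' ' for ch in s)
--     tokens = [t for t in clean.split() if t]
--     # 可能的關鍵字與同義詞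
--     UP = {'up', 'uparrow', 'upwards', 'thumbsup', 'thumbs', 'palm', 'raise'}
--     LEFT = {'left', 'leftward', 'leftwards'}
--     RIGHT = {'right', 'rightward', 'rightwards'}
--     DOWN = {'down', 'bottom', 'downwards', 'downward'}
--
--     for t in tokens:
--         if t in UP:
--             return 'up'
--         if t in LEFT:
--             return 'left'
--         if t in RIGHT:
--             return 'right'
--         if t in DOWN:
--             return 'down'
--     # 若 tokens 包含像 '0','1','2','3' 的數字，回傳數字字串供後續根據索引映射
--     for t in tokens:
--         if t.isdigit():
--             return t  # 回傳數字字串，load_model_safe 會處理索引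
--     # 若無法辨識，回傳空字串
--     return ''
-- ===== SOURCE B (Python) =====
-- def _normalize_label_for_matching(s: str) -> str:
--     s = s.strip().lower()
--     clean = ''.join(ch if ch.isalnum() else ' ' for ch in s)
--     keywords = {
--         'up': 'up', 'uparrow': 'up', 'upwards': 'up', 'thumbsup': 'up',
--         'thumbs': 'up', 'palm': 'up', 'raise': 'up',
--         'left': 'left', 'leftward': 'left', 'leftwards': 'left',
--         'right': 'right', 'rightward': 'right', 'rightwards': 'right',
--         'down': 'down', 'bottom': 'down', 'downwards': 'down', 'downward': 'down',
--     }
--     first_digit = None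
--     for t in clean.split():
--         d = keywords.get(t)
--         if d is not None:
--             return d
--         if first_digit is None and t.isdigit():
--             first_digit = t
--     return first_digit if first_digit is not None else ''
-- ===== Notes on version B (the rewrite author's own statement) =====
-- stated objective: alternative
-- what changed: A's two separate scans over the tokens (one against four keyword sets, then one for the first digit) are collapsed into a single pass that looks each token up in one keyword->direction dict and remembers the first digit seen; the redundant empty-string guard and empty-token filter are dropped.
import Mathlib
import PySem

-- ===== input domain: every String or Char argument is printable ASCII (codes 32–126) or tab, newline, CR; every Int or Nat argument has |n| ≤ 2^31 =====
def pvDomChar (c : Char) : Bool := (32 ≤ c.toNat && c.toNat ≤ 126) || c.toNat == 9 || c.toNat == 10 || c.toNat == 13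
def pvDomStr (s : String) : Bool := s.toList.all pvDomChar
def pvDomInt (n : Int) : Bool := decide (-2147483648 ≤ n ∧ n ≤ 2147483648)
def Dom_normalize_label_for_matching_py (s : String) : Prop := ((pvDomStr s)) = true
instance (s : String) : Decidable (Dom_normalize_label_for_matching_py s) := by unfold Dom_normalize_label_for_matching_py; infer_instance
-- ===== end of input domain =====

-- B collapses A's two scans (keyword sets, then first digit) into one pass with a
-- keyword→direction dict and a remembered first digit; return values are identical.

-- ===== PORT A =====
def pvUP : PySem.Set String := PySem.Set.ofList ["up", "uparrow", "upwards", "thumbsup", "thumbs", "palm", "raise"]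
def pvLEFT : PySem.Set String := PySem.Set.ofList ["left", "leftward", "leftwards"]
def pvRIGHT : PySem.Set String := PySem.Set.ofList ["right", "rightward", "rightwards"]
def pvDOWN : PySem.Set String := PySem.Set.ofList ["down", "bottom", "downwards", "downward"]

-- A's first loop: first token in one of the four sets (some direction), else none
def pvLoopA1 : List String → Option String
  | [] => none
  | t :: rest =>
    if PySem.Set.contains pvUP t then some "up"
    else if PySem.Set.contains pvLEFT t then some "left"
    else if PySem.Set.contains pvRIGHT t then some "right"
    else if PySem.Set.contains pvDOWN t then some "down"
    else pvLoopA1 rest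

-- A's second loop: first token that isdigit
def pvLoopA2 : List String → Option String
  | [] => none
  | t :: rest => if PySem.Str.strIsdigit t then some t else pvLoopA2 rest

def normalize_label_for_matching_py (s : String) : String :=
  if s == "" then ""
  else
    let s1 := PySem.Str.lower (PySem.Str.strip s)
    -- ''.join(ch if ch.isalnum() else ' ' for ch in s): joined char by char, exact on ASCII
    let clean := PySem.Str.join "" (s1.toList.map (fun ch => if PySem.Chars.isalnum ch then String.ofList [ch] else " "))
    let tokens := (PySem.Str.split₀ clean).filter (fun t => t != "")
    match pvLoopA1 tokens with
    | some d => d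
    | none =>
      match pvLoopA2 tokens with
      | some t => t
      | none => ""

-- ===== PORT B =====
def pvKW : PySem.Dict String String := PySem.Dict.ofList
  [("up", "up"), ("uparrow", "up"), ("upwards", "up"), ("thumbsup", "up"),
   ("thumbs", "up"), ("palm", "up"), ("raise", "up"),
   ("left", "left"), ("leftward", "left"), ("leftwards", "left"),
   ("right", "right"), ("rightward", "right"), ("rightwards", "right"),
   ("down", "down"), ("bottom", "down"), ("downwards", "down"), ("downward", "down")]

-- B's single pass: dict lookup returns immediately; else record the first digit
def pvScanB : List String → Option String → String
  | [], firstDigit => firstDigit.getD ""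
  | t :: rest, firstDigit =>
    match PySem.Dict.get? pvKW t with
    | some d => d
    | none =>
      pvScanB rest (if firstDigit.isNone && PySem.Str.strIsdigit t then some t else firstDigit)

def normalize_label_for_matching_py_alt (s : String) : String :=
  let s1 := PySem.Str.lower (PySem.Str.strip s)
  let clean := PySem.Str.join "" (s1.toList.map (fun ch => if PySem.Chars.isalnum ch then String.ofList [ch] else " "))
  pvScanB (PySem.Str.split₀ clean) none

-- ===== PRECONDITION & SPEC =====
def Spec_normalize_label_for_matching_py (s : String) (out : String) : Prop := out = normalize_label_for_matching_py_alt s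
instance (s : String) (out : String) : Decidable (Spec_normalize_label_for_matching_py s out) := by unfold Spec_normalize_label_for_matching_py; infer_instance

-- ===== CLAIM (what is proved, stated in full; the proofs are below) =====
def Claim_equal_normalize_label_for_matching_py : Prop := ∀ (s : String), Dom_normalize_label_for_matching_py s → Spec_normalize_label_for_matching_py s (normalize_label_for_matching_py s)

-- ===== LEMMAS AND PROOFS =====

theorem pvKW_eval : pvKW = PySem.Dict.mk
    [("up", "up"), ("uparrow", "up"), ("upwards", "up"), ("thumbsup", "up"),
     ("thumbs", "up"), ("palm", "up"), ("raise", "up"),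
     ("left", "left"), ("leftward", "left"), ("leftwards", "left"),
     ("right", "right"), ("rightward", "right"), ("rightwards", "right"),
     ("down", "down"), ("bottom", "down"), ("downwards", "down"), ("downward", "down")] := by rfl
theorem pvUP_eval : pvUP = ["up", "uparrow", "upwards", "thumbsup", "thumbs", "palm", "raise"] := by rfl
theorem pvLEFT_eval : pvLEFT = ["left", "leftward", "leftwards"] := by rfl
theorem pvRIGHT_eval : pvRIGHT = ["right", "rightward", "rightwards"] := by rfl
theorem pvDOWN_eval : pvDOWN = ["down", "bottom", "downwards", "downward"] := by rfl
set_option maxHeartbeats 1000000 in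
theorem pvDir_eq (t : String) :
    (if PySem.Set.contains pvUP t then some "up"
     else if PySem.Set.contains pvLEFT t then some "left"
     else if PySem.Set.contains pvRIGHT t then some "right"
     else if PySem.Set.contains pvDOWN t then some "down"
     else (none : Option String)) = PySem.Dict.get? pvKW t := by
  rw [pvKW_eval, pvUP_eval, pvLEFT_eval, pvRIGHT_eval, pvDOWN_eval]
  by_cases h0 : t = "up"
  · subst h0; decide
  by_cases h1 : t = "uparrow"
  · subst h1; decide
  by_cases h2 : t = "upwards"
  · subst h2; decide
  by_cases h3 : t = "thumbsup"
  · subst h3; decide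
  by_cases h4 : t = "thumbs"
  · subst h4; decide
  by_cases h5 : t = "palm"
  · subst h5; decide
  by_cases h6 : t = "raise"
  · subst h6; decide
  by_cases h7 : t = "left"
  · subst h7; decide
  by_cases h8 : t = "leftward"
  · subst h8; decide
  by_cases h9 : t = "leftwards"
  · subst h9; decide
  by_cases h10 : t = "right"
  · subst h10; decide
  by_cases h11 : t = "rightward"
  · subst h11; decide
  by_cases h12 : t = "rightwards"
  · subst h12; decide
  by_cases h13 : t = "down"
  · subst h13; decide
  by_cases h14 : t = "bottom"
  · subst h14; decide
  by_cases h15 : t = "downwards"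
  · subst h15; decide
  by_cases h16 : t = "downward"
  · subst h16; decide
  simp [PySem.Set.contains_eq_listContains, PySem.Dict.get?, h0, h1, h2, h3, h4, h5, h6, h7, h8, h9, h10, h11, h12, h13, h14, h15, h16, Ne.symm h0, Ne.symm h1, Ne.symm h2, Ne.symm h3, Ne.symm h4, Ne.symm h5, Ne.symm h6, Ne.symm h7, Ne.symm h8, Ne.symm h9, Ne.symm h10, Ne.symm h11, Ne.symm h12, Ne.symm h13, Ne.symm h14, Ne.symm h15, Ne.symm h16]

-- pvLoopA1's ordered set tests, as a match on B's dict lookup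
theorem pvLoopA1_cons (t : String) (rest : List String) :
    pvLoopA1 (t :: rest) =
      (match PySem.Dict.get? pvKW t with
       | some d => some d
       | none => pvLoopA1 rest) := by
  rw [pvLoopA1, ← pvDir_eq t]
  split_ifs <;> simp

-- B's single pass equals A's two loops, for any remembered first digit
theorem pvScan_eq (tokens : List String) (fd : Option String) :
    pvScanB tokens fd = (pvLoopA1 tokens).getD (fd.getD ((pvLoopA2 tokens).getD "")) := by
  induction tokens generalizing fd with
  | nil => rfl
  | cons t rest ih =>
    rw [pvScanB, pvLoopA1_cons, pvLoopA2]
    cases hk : PySem.Dict.get? pvKW t with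
    | some d => simp
    | none =>
      cases fd with
      | some x => simpa using ih (some x)
      | none =>
        by_cases hd : PySem.Str.strIsdigit t
        · simp only [Option.isNone_none, Bool.true_and]
          rw [if_pos hd, if_pos hd]
          simpa using ih (some t)
        · simp only [Option.isNone_none, Bool.true_and]
          rw [if_neg hd, if_neg hd]
          exact ih none

-- split() never yields an empty token
theorem pvGo_ne_nil (s : List Char) : ∀ (cur : List Char) (acc : List (List Char)),
    (∀ t ∈ acc, t ≠ []) → ∀ t ∈ PySem.Chars.split₀.go s cur acc, t ≠ [] := by
  induction s with
  | nil =>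
    intro cur acc hacc t ht
    rw [PySem.Chars.split₀.go] at ht
    split at ht
    · exact hacc t (by simpa using ht)
    · rename_i hcur
      simp only [List.mem_reverse, List.mem_cons] at ht
      rcases ht with rfl | h
      · simp only [ne_eq, List.reverse_eq_nil_iff]
        intro hc; exact hcur (by simp [hc])
      · exact hacc t h
  | cons c rest ih =>
    intro cur acc hacc t ht
    rw [PySem.Chars.split₀.go] at ht
    split at ht
    · split at ht
      · exact ih [] acc hacc t ht
      · rename_i hcur
        refine ih [] (cur.reverse :: acc) ?_ t ht
        intro u hu
        rcases List.mem_cons.mp hu with rfl | hu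
        · simp only [ne_eq, List.reverse_eq_nil_iff]
          intro hc; exact hcur (by simp [hc])
        · exact hacc u hu
    · exact ih (c :: cur) acc hacc t ht

theorem pvSplit₀_ne_nil (s : String) : ∀ t ∈ PySem.Str.split₀ s, t ≠ "" := by
  intro t ht hte
  have h2 : t.toList ∈ (PySem.Str.split₀ s).map String.toList := List.mem_map_of_mem ht
  rw [PySem.Str.split₀_map_toList] at h2
  have := pvGo_ne_nil s.toList [] [] (by simp) t.toList h2
  subst hte
  simp at this

theorem pvFilter_tokens (s : String) :
    (PySem.Str.split₀ s).filter (fun t => t != "") = PySem.Str.split₀ s := by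
  apply List.filter_eq_self.mpr
  intro t ht
  simpa using pvSplit₀_ne_nil s t ht

-- ===== VERDICT (by name: the statement is the Claim_ definition above) =====
theorem normalize_label_for_matching_py_spec : Claim_equal_normalize_label_for_matching_py := by
  intro s _
  unfold Spec_normalize_label_for_matching_py normalize_label_for_matching_py normalize_label_for_matching_py_alt
  by_cases hs : s = ""
  · subst hs; decide
  · simp only [beq_iff_eq, hs, if_false, pvFilter_tokens, pvScan_eq]
    cases pvLoopA1 (PySem.Str.split₀ _) <;> cases pvLoopA2 (PySem.Str.split₀ _) <;> simp
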